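-- pv_equiv track=rewrite | github.com/IsbatBInHossain/DSA-Practice | LeetCode/Hasmap or Set/621. Task Scheduler.py | find_max_frequency
-- ===== SOURCE A (Python) =====
-- from collections import Counter
-- from typing import List
--
-- def find_max_frequency(data: List[int])-> tuple[int, int]:
--     frequency_map = Counter(data)
--
--     max_frequency = max(frequency_map.values(), default=0)
--     count = 0
--     for value in frequency_map.values():
--         if value == max_frequency:
--             count += 1
--
--     return max_frequency, count
-- ===== SOURCE B (Python) =====
-- from typing import List
--
-- def find_max_frequency(data: List[int]) -> tuple[int, int]:
--     counts = {}
--     max_frequency = 0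
--     count = 0
--     for x in data:
--         f = counts.get(x, 0) + 1
--         counts[x] = f
--         if f > max_frequency:
--             max_frequency = f
--             count = 1
--         elif f == max_frequency:
--             count += 1
--     return max_frequency, count
-- ===== Notes on version B (the rewrite author's own statement) =====
-- stated objective: alternative
-- what changed: A builds a Counter, takes max() of its values, then re-scans the values to count ties; B is a single streaming pass that maintains the running count per element and updates the pair (max_frequency, count of elements attaining it) online at each increment, with no max() call and no second scan.
import Mathlib
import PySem

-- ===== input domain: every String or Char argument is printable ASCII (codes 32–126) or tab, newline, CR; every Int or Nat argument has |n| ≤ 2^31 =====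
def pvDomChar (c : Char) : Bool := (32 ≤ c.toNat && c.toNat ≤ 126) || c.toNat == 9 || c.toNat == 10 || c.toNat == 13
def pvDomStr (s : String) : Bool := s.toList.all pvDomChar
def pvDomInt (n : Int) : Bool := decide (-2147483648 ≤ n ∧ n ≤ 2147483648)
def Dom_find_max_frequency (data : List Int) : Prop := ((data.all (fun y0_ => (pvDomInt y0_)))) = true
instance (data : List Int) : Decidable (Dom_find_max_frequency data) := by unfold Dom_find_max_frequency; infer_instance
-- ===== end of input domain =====

-- B replaces A's Counter + max() + second counting scan by a single streaming pass that
-- maintains (counts, max_frequency, count-of-ties) online (alternative decomposition; same cost).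

-- ===== PORT A =====
-- A: Counter, then max(values, default=0), then a scan counting values equal to the max.
def find_max_frequency (data : List Int) : Int × Int :=
  let frequency_map := PySem.Dict.counter data
  let max_frequency := PySem.List.maxD frequency_map.values (fun v => v) 0
  let count := frequency_map.values.foldl (fun c v => if v == max_frequency then c + 1 else c) 0
  (max_frequency, count)

-- ===== PORT B =====
-- B's loop body: f = counts.get(x,0)+1; counts[x] = f; then update (max_frequency, count) online.
def fmfStep (st : PySem.Dict Int Int × Int × Int) (x : Int) : PySem.Dict Int Int × Int × Int :=
  let f := st.1.getD x 0 + 1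
  let counts := st.1.insert x f
  if f > st.2.1 then (counts, f, 1)
  else if f = st.2.1 then (counts, st.2.1, st.2.2 + 1)
  else (counts, st.2.1, st.2.2)

def find_max_frequency_alt (data : List Int) : Int × Int :=
  let st := data.foldl fmfStep (PySem.Dict.empty, 0, 0)
  (st.2.1, st.2.2)

-- ===== PRECONDITION & SPEC =====
def Spec_find_max_frequency (data : List Int) (out : Int × Int) : Prop := out = find_max_frequency_alt data
instance (data : List Int) (out : Int × Int) : Decidable (Spec_find_max_frequency data out) := by unfold Spec_find_max_frequency; infer_instance

-- ===== CLAIM (what is proved, stated in full; the proofs are below) =====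
def Claim_equal_find_max_frequency : Prop := ∀ (data : List Int), Dom_find_max_frequency data → Spec_find_max_frequency data (find_max_frequency data)

-- ===== LEMMAS AND PROOFS =====

-- the multiset of per-element counts of l (values of Counter(l)), its max, and the tie count
def pvVals (l : List Int) : List Int := (PySem.Set.ofList l).map (fun k => (l.count k : Int))
def pvM (l : List Int) : Int := PySem.List.maxD (pvVals l) (fun v => v) 0
def pvC (l : List Int) : Int := ((pvVals l).count (pvM l) : Int)

theorem maxD_eq_of (s : List Int) (v : Int) (hb : ∀ y ∈ s, y ≤ v) (hm : v ∈ s) :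
    PySem.List.maxD s (fun y => y) 0 = v := by
  rcases h : PySem.List.max? s (fun y : Int => y) with _ | m
  · have : s = [] := (PySem.List.max?_eq_none_iff _ _).mp h
    subst this; cases hm
  · have h1 := PySem.List.max?_isMax h v hm
    have h2 := hb m (PySem.List.max?_mem h)
    simp only [PySem.List.maxD, h, Option.getD_some]
    omega

theorem mem_vals_le (l : List Int) (y : Int) (hy : y ∈ pvVals l) : y ≤ pvM l := by
  rcases h : PySem.List.max? (pvVals l) (fun y : Int => y) with _ | m
  · have : pvVals l = [] := (PySem.List.max?_eq_none_iff _ _).mp h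
    rw [this] at hy; cases hy
  · have := PySem.List.max?_isMax h y hy
    simp only [pvM, PySem.List.maxD, h, Option.getD_some]
    exact this

theorem pvM_mem (l : List Int) (hl : l ≠ []) : pvM l ∈ pvVals l := by
  rcases h : PySem.List.max? (pvVals l) (fun y : Int => y) with _ | m
  · have hnil : pvVals l = [] := (PySem.List.max?_eq_none_iff _ _).mp h
    rcases l with _ | ⟨a, t⟩
    · exact absurd rfl hl
    · have ha : a ∈ PySem.Set.ofList (a :: t) := (PySem.Set.mem_ofList _ _).mpr (by simp)
      have : ((a :: t).count a : Int) ∈ pvVals (a :: t) := List.mem_map_of_mem ha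
      rw [hnil] at this; cases this
  · simp only [pvM, PySem.List.maxD, h, Option.getD_some]
    exact PySem.List.max?_mem h

theorem countP_except (s : List Int) (x : Int) (p q : Int → Bool)
    (hnd : s.Nodup) (hx : x ∈ s)
    (h : ∀ k ∈ s, k ≠ x → p k = q k) (hpx : p x = true) (hqx : q x = false) :
    s.countP p = s.countP q + 1 := by
  induction s with
  | nil => cases hx
  | cons a t ih =>
    rcases List.mem_cons.mp hx with rfl | hxt
    · have hcpq : List.countP p t = List.countP q t := by
        apply List.countP_congr
        intro k hk
        have hkx : k ≠ x := by rintro rfl; exact (List.nodup_cons.mp hnd).1 hk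
        rw [h k (List.mem_cons_of_mem _ hk) hkx]
      rw [List.countP_cons, List.countP_cons, hpx, hqx, hcpq]
      simp
    · have hax : a ≠ x := by rintro rfl; exact (List.nodup_cons.mp hnd).1 hxt
      rw [List.countP_cons, List.countP_cons, h a List.mem_cons_self hax,
        ih (List.nodup_cons.mp hnd).2 hxt (fun k hk => h k (List.mem_cons_of_mem _ hk))]
      omega

theorem one_le_mem_vals (l : List Int) (y : Int) (hy : y ∈ pvVals l) : 1 ≤ y := by
  rcases List.mem_map.mp hy with ⟨k, hk, rfl⟩
  have : k ∈ l := (PySem.Set.mem_ofList _ _).mp hk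
  have := List.count_pos_iff.mpr this
  omega

theorem fmf_inv (l : List Int) :
    l.foldl fmfStep (PySem.Dict.empty, 0, 0) = (PySem.Dict.counter l, pvM l, pvC l) := by
  induction l using List.reverseRecOn with
  | nil => decide
  | append_singleton l x ih =>
    rw [List.foldl_append, List.foldl_cons, List.foldl_nil, ih]
    -- the dict component: insert x (getD x 0 + 1) is exactly the Counter step
    have hdict : (PySem.Dict.counter l).insert x ((PySem.Dict.counter l).getD x 0 + 1)
        = PySem.Dict.counter (l ++ [x]) := by
      rw [← PySem.Dict.foldl_insert_getD_add_one_eq_counter,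
        ← PySem.Dict.foldl_insert_getD_add_one_eq_counter, List.foldl_append,
        List.foldl_cons, List.foldl_nil]
    have hf : (PySem.Dict.counter l).getD x 0 + 1 = (l.count x : Int) + 1 := by
      rw [PySem.Dict.getD_counter]
    by_cases hxl : x ∈ l
    · -- x already seen: the key set is unchanged, one count bumps from count x to count x + 1
      have hset : PySem.Set.ofList (l ++ [x]) = PySem.Set.ofList l := by
        rw [PySem.Set.ofList_eq_foldl, List.foldl_append, List.foldl_cons, List.foldl_nil,
          ← PySem.Set.ofList_eq_foldl]
        simp [PySem.Set.add, PySem.Set.contains, hxl]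
      have hcnt : ∀ k : Int, ((l ++ [x]).count k : Int)
          = if k = x then (l.count x : Int) + 1 else (l.count k : Int) := by
        intro k; rw [List.count_append]
        by_cases hk : k = x
        · simp [hk]
        · have hxk : x ≠ k := fun h => hk h.symm
          simp [hk, hxk]
      have hvals : pvVals (l ++ [x]) = (PySem.Set.ofList l).map
          (fun k => if k = x then (l.count x : Int) + 1 else (l.count k : Int)) := by
        simp only [pvVals, hset]
        exact List.map_congr_left (fun k _ => hcnt k)
      have hxs : x ∈ PySem.Set.ofList l := (PySem.Set.mem_ofList _ _).mpr hxl
      have hnd : (PySem.Set.ofList l).Nodup := PySem.Set.nodup_ofList l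
      have hold : ((l.count x : Int)) ∈ pvVals l := List.mem_map_of_mem hxs
      have holdle : (l.count x : Int) ≤ pvM l := mem_vals_le l _ hold
      have hlne : l ≠ [] := by rintro rfl; cases hxl
      have hdict' : (PySem.Dict.counter l).insert x ((l.count x : Int) + 1)
          = PySem.Dict.counter (l ++ [x]) := by rw [← hf]; exact hdict
      simp only [fmfStep, hf, hdict']
      by_cases hgt : (l.count x : Int) + 1 > pvM l
      · -- new strict maximum
        have hM' : pvM (l ++ [x]) = (l.count x : Int) + 1 := by
          apply maxD_eq_of
          · intro y hy
            rw [hvals] at hy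
            rcases List.mem_map.mp hy with ⟨k, hk, rfl⟩
            by_cases hkx : k = x
            · simp [hkx]
            · have := mem_vals_le l _ (List.mem_map_of_mem hk :
                ((l.count k : Int)) ∈ pvVals l)
              simp only [hkx, if_false]
              omega
          · rw [hvals]
            exact List.mem_map.mpr ⟨x, hxs, by simp⟩
        have h1 : (pvVals (l ++ [x])).count ((l.count x : Int) + 1) = 1 := by
          rw [hvals, List.count_eq_countP, List.countP_map]
          have hcongr : ∀ k ∈ PySem.Set.ofList l,
              (((fun y => y == (l.count x : Int) + 1) ∘
                fun k => if k = x then (l.count x : Int) + 1 else (l.count k : Int)) k = true)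
              ↔ ((k == x) = true) := by
            intro k hk
            by_cases hkx : k = x
            · simp [hkx]
            · have := mem_vals_le l _ (List.mem_map_of_mem hk :
                ((l.count k : Int)) ∈ pvVals l)
              simp only [Function.comp_apply, hkx, if_false, beq_iff_eq]
              constructor
              · intro h; omega
              · intro h; exact h.elim
          rw [List.countP_congr hcongr, ← List.count_eq_countP,
            List.count_eq_one_of_mem hnd hxs]
        have hC' : pvC (l ++ [x]) = 1 := by
          simp [pvC, hM', h1]
        simp [hgt, hM', hC']
      · by_cases heq : (l.count x : Int) + 1 = pvM l
        · -- x joins the set of maximisers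
          have hM' : pvM (l ++ [x]) = pvM l := by
            apply maxD_eq_of
            · intro y hy
              rw [hvals] at hy
              rcases List.mem_map.mp hy with ⟨k, hk, rfl⟩
              by_cases hkx : k = x
              · simp only [hkx, if_true]; omega
              · have := mem_vals_le l _ (List.mem_map_of_mem hk :
                  ((l.count k : Int)) ∈ pvVals l)
                simp only [hkx, if_false]; omega
            · rw [hvals]
              exact List.mem_map.mpr ⟨x, hxs, by simp [heq]⟩
          have h1 : (pvVals (l ++ [x])).count (pvM l) = (pvVals l).count (pvM l) + 1 := by
            rw [hvals, List.count_eq_countP, List.countP_map]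
            have h2 : (pvVals l).count (pvM l)
                = (PySem.Set.ofList l).countP
                    (fun k => ((l.count k : Int)) == pvM l) := by
              rw [pvVals, List.count_eq_countP, List.countP_map]; rfl
            rw [h2]
            exact countP_except (PySem.Set.ofList l) x _ _ hnd hxs
              (by intro k hk hkx; simp [hkx])
              (by simp [heq])
              (by show ((l.count x : Int) == pvM l) = false
                  rw [beq_eq_false_iff_ne]; omega)
          have hC' : pvC (l ++ [x]) = pvC l + 1 := by
            simp only [pvC, hM', h1]; push_cast; ring
          simp [heq, hM', hC']
        · -- x stays strictly below the maximum
          have hlt : (l.count x : Int) + 1 < pvM l := by omega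
          have hM' : pvM (l ++ [x]) = pvM l := by
            apply maxD_eq_of
            · intro y hy
              rw [hvals] at hy
              rcases List.mem_map.mp hy with ⟨k, hk, rfl⟩
              by_cases hkx : k = x
              · simp only [hkx, if_true]; omega
              · have := mem_vals_le l _ (List.mem_map_of_mem hk :
                  ((l.count k : Int)) ∈ pvVals l)
                simp only [hkx, if_false]; omega
            · rcases List.mem_map.mp (pvM_mem l hlne) with ⟨k0, hk0, hkv⟩
              have hk0x : k0 ≠ x := by rintro rfl; omega
              rw [hvals]
              exact List.mem_map.mpr ⟨k0, hk0, by simp [hk0x, hkv]⟩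
          have h1 : (pvVals (l ++ [x])).count (pvM l) = (pvVals l).count (pvM l) := by
            rw [hvals, List.count_eq_countP, List.countP_map]
            have h2 : (pvVals l).count (pvM l)
                = (PySem.Set.ofList l).countP
                    (fun k => ((l.count k : Int)) == pvM l) := by
              rw [pvVals, List.count_eq_countP, List.countP_map]; rfl
            rw [h2]
            apply List.countP_congr
            intro k hk
            by_cases hkx : k = x
            · subst hkx
              simp only [Function.comp_apply, if_true, beq_iff_eq]
              constructor
              · intro h; omega
              · intro h; omega
            · simp [hkx]
          have hC' : pvC (l ++ [x]) = pvC l := by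
            simp only [pvC, hM', h1]
          simp [hgt, heq, hM', hC']
    · -- x unseen: f = 1, the key set gains x at the end, vals gains a trailing 1
      have hc0 : l.count x = 0 := List.count_eq_zero.mpr hxl
      have hset : PySem.Set.ofList (l ++ [x]) = PySem.Set.ofList l ++ [x] := by
        rw [PySem.Set.ofList_eq_foldl, List.foldl_append, List.foldl_cons, List.foldl_nil,
          ← PySem.Set.ofList_eq_foldl]
        simp [PySem.Set.add, PySem.Set.contains, hxl]
      have hvals : pvVals (l ++ [x]) = pvVals l ++ [1] := by
        simp only [pvVals, hset, List.map_append, List.map_cons, List.map_nil]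
        congr 1
        · apply List.map_congr_left
          intro k hk
          have hkx : k ≠ x := by
            rintro rfl; exact hxl ((PySem.Set.mem_ofList _ _).mp hk)
          have hxk : x ≠ k := fun h => hkx h.symm
          rw [List.count_append]
          simp [hxk]
        · rw [List.count_append, hc0]
          simp
      have hdict1 : (PySem.Dict.counter l).insert x 1 = PySem.Dict.counter (l ++ [x]) := by
        have h' := hdict
        rw [hf, hc0] at h'
        simpa using h'
      simp only [fmfStep, hf, hc0, Nat.cast_zero, zero_add]
      rcases eq_or_ne l [] with rfl | hlne
      · -- first element ever: max becomes 1 with one maximiser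
        have hv : pvVals ([] ++ [x]) = [1] := by
          simp [pvVals, PySem.Set.ofList_eq_foldl, PySem.Set.add, PySem.Set.contains]
        have hM'' : pvM ([] ++ [x]) = 1 := by rw [pvM, hv]; rfl
        have hC'' : pvC ([] ++ [x]) = 1 := by rw [pvC, hv, hM'']; rfl
        have h0 : pvM ([] : List Int) = 0 := rfl
        rw [h0, if_pos (by norm_num : (1 : Int) > 0), hdict1, hM'', hC'']
      · have hM1 : 1 ≤ pvM l := one_le_mem_vals l _ (pvM_mem l hlne)
        have hngt : ¬ ((1 : Int) > pvM l) := by omega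
        have hM' : pvM (l ++ [x]) = pvM l := by
          apply maxD_eq_of
          · intro y hy
            rw [hvals] at hy
            rcases List.mem_append.mp hy with hy | hy
            · exact mem_vals_le l y hy
            · simp at hy; omega
          · rw [hvals]; exact List.mem_append_left _ (pvM_mem l hlne)
        by_cases heq : (1 : Int) = pvM l
        · have hcnt1 : ([1] : List Int).count (pvM l) = 1 := by rw [← heq]; simp
          have hC' : pvC (l ++ [x]) = pvC l + 1 := by
            rw [pvC, hvals, hM', List.count_append, hcnt1, pvC]
            push_cast; ring
          rw [if_neg hngt, if_pos heq, hdict1, hM', hC']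
        · have hne1 : pvM l ≠ 1 := fun h => heq h.symm
          have hcnt0 : ([1] : List Int).count (pvM l) = 0 := by
            simp [List.count_cons]; omega
          have hC' : pvC (l ++ [x]) = pvC l := by
            rw [pvC, hvals, hM', List.count_append, hcnt0, pvC]
            push_cast; ring
          rw [if_neg hngt, if_neg heq, hdict1, hM', hC']

-- A's value list is exactly pvVals
theorem values_counter_eq (l : List Int) :
    (PySem.Dict.counter l).values = pvVals l := by
  simp only [PySem.Dict.values, PySem.Dict.items_counter, pvVals, List.map_map]
  rfl

-- ===== VERDICT (by name: the statement is the Claim_ definition above) =====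
theorem find_max_frequency_spec : Claim_equal_find_max_frequency := by
  intro data _
  unfold Spec_find_max_frequency find_max_frequency find_max_frequency_alt
  rw [fmf_inv]
  simp only [values_counter_eq, PySem.List.foldl_beq_add_one, zero_add, pvM, pvC]
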